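-- pv_equiv track=rewrite | github.com/satyaholla/Programming-Assignments | 6.0001 Psets/1_ps3/document_distance.py | sortedListOfDictMax
-- ===== SOURCE A (Python) =====
-- def sortedListOfDictMax(dict1):
--     words = []
--     m = max(dict1.values())
--     for k in dict1:
--         if dict1[k] == m:
--             words.append(k)
--     words.sort()
--     return words
-- ===== SOURCE B (Python) =====
-- def sortedListOfDictMax(dict1):
--     groups = {}
--     for k, v in dict1.items():
--         groups.setdefault(v, []).append(k)
--     return sorted(groups[max(groups)])
-- ===== Notes on version B (the rewrite author's own statement) =====
-- stated objective: alternative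
-- what changed: B builds a value-to-keys grouping dictionary in one pass over the items and returns the sorted bucket of the maximal value, instead of A's separate max pass over values followed by an equality-filter pass over the keys.
import Mathlib
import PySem

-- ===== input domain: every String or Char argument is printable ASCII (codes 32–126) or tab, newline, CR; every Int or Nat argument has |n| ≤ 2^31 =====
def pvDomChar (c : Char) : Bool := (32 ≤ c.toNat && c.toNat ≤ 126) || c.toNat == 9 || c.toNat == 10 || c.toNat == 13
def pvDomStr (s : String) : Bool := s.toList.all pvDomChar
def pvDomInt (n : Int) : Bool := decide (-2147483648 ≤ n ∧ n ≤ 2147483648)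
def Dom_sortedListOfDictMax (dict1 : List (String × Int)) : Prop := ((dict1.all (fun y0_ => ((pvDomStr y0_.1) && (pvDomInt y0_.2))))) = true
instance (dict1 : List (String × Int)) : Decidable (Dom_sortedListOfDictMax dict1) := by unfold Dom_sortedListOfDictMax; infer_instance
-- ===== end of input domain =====

-- B replaces A's max-over-values pass plus key-filter pass by a single-pass value→keys grouping
-- dictionary whose maximal key's bucket is returned sorted (objective: alternative, same cost).


-- ===== PORT A =====
-- m = max(dict1.values()); for k in dict1: if dict1[k] == m: words.append(k); words.sort()
-- dict1[k] is PySem.Dict.get?; it never misses since k ranges over the dict's own keys,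
-- so comparing with `some m` is exact.
def sortedListOfDictMax (dict1 : List (String × Int)) : List String :=
  let d := PySem.Dict.mk dict1
  match PySem.List.max? d.values (fun v => v) with
  | none => []                                   -- unreachable under Pre_ (max of empty raises)
  | some m =>
      let words := d.keys.foldl
        (fun ws k => if d.get? k = some m then ws ++ [k] else ws) []
      PySem.List.sorted words (fun x => x)

-- ===== PORT B =====
-- groups.setdefault(v, []).append(k)  ≡  groups[v] = groups.get(v, []) + [k]  = Dict.modify
def sortedListOfDictMax_alt (dict1 : List (String × Int)) : List String :=
  let groups : PySem.Dict Int (List String) :=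
    dict1.foldl (fun g kv => g.modify kv.2 [] (fun l => l ++ [kv.1])) PySem.Dict.empty
  match PySem.List.max? groups.keys (fun v => v) with
  | none => []                                   -- unreachable under Pre_ (max of empty raises)
  | some m => PySem.List.sorted (groups.getD m []) (fun x => x)

-- ===== PRECONDITION & SPEC =====
-- Pre_ excludes the empty dict, on which A (and B) raise ValueError in max(),
-- and association lists with duplicate keys, which cannot encode a Python dict.
def Pre_sortedListOfDictMax (dict1 : List (String × Int)) : Prop :=
  dict1 ≠ [] ∧ (dict1.map Prod.fst).Nodup
instance (dict1 : List (String × Int)) : Decidable (Pre_sortedListOfDictMax dict1) := by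
  unfold Pre_sortedListOfDictMax; infer_instance
def pvWitness_sortedListOfDictMax : (List (String × Int)) := [("a", 1), ("b", 2)]
def Spec_sortedListOfDictMax (dict1 : List (String × Int)) (out : List String) : Prop := out = sortedListOfDictMax_alt dict1
instance (dict1 : List (String × Int)) (out : List String) : Decidable (Spec_sortedListOfDictMax dict1 out) := by unfold Spec_sortedListOfDictMax; infer_instance

-- ===== CLAIM (what is proved, stated in full; the proofs are below) =====
def Claim_equal_sortedListOfDictMax : Prop := ∀ (dict1 : List (String × Int)), Dom_sortedListOfDictMax dict1 → Pre_sortedListOfDictMax dict1 → Spec_sortedListOfDictMax dict1 (sortedListOfDictMax dict1)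

-- ===== LEMMAS AND PROOFS =====

-- the common value both programs sort: first components of the pairs whose value is m
def pvMaxKeys (dict1 : List (String × Int)) (m : Int) : List String :=
  (dict1.filter (fun kv => kv.2 == m)).map Prod.fst

-- the keys whose lookup gives m, under unique keys, are the first components of pairs valued m
lemma filter_keys_eq (dict1 : List (String × Int)) (m : Int)
    (hn : (dict1.map Prod.fst).Nodup) :
    List.filter (fun k => decide ((PySem.Dict.mk dict1).get? k = some m))
      (PySem.Dict.mk dict1).keys = pvMaxKeys dict1 m := by
  induction dict1 with
  | nil => rfl
  | cons x t ih =>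
      simp only [List.map_cons, List.nodup_cons] at hn
      have hx : (PySem.Dict.mk (x :: t)).keys = x.1 :: (PySem.Dict.mk t).keys := rfl
      rw [hx, List.filter_cons]
      have hget : (PySem.Dict.mk (x :: t)).get? x.1 = some x.2 := by
        rw [PySem.Dict.get?_mk_cons]; simp
      have hcong : ∀ k ∈ (PySem.Dict.mk t).keys,
          decide ((PySem.Dict.mk (x :: t)).get? k = some m)
            = decide ((PySem.Dict.mk t).get? k = some m) := by
        intro k hk
        have hne : x.1 ≠ k := by
          intro he; exact hn.1 (he ▸ hk)
        rw [PySem.Dict.get?_mk_cons]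
        simp [beq_iff_eq, hne]
      rw [List.filter_congr hcong, ih hn.2]
      by_cases hv : x.2 = m
      · have : (PySem.Dict.mk (x :: t)).get? x.1 = some m := by rw [hget, hv]
        simp [pvMaxKeys, this, hv]
      · have : ¬ (PySem.Dict.mk (x :: t)).get? x.1 = some m := by
          rw [hget]; simp [hv]
        simp [pvMaxKeys, this, hv]

-- A's filter loop, as a filter over the keys
lemma A_words_eq (dict1 : List (String × Int)) (m : Int)
    (hn : (dict1.map Prod.fst).Nodup) :
    (PySem.Dict.mk dict1).keys.foldl
      (fun ws k => if (PySem.Dict.mk dict1).get? k = some m then ws ++ [k] else ws) []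
    = pvMaxKeys dict1 m := by
  have h := PySem.List.foldl_append_if
    (fun k => decide ((PySem.Dict.mk dict1).get? k = some m)) (fun k => k)
    (PySem.Dict.mk dict1).keys []
  simp only [decide_eq_true_eq] at h
  rw [h, List.nil_append, List.map_id' _, ← filter_keys_eq dict1 m hn]

-- the grouping fold's step
def pvStep (g : PySem.Dict Int (List String)) (kv : String × Int) : PySem.Dict Int (List String) :=
  g.modify kv.2 [] (fun l => l ++ [kv.1])

-- bucket of the grouping dict
lemma getD_build (l : List (String × Int)) (g : PySem.Dict Int (List String)) (m : Int) :
    (l.foldl pvStep g).getD m [] = g.getD m [] ++ pvMaxKeys l m := by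
  induction l generalizing g with
  | nil => simp [pvMaxKeys]
  | cons x t ih =>
      rw [List.foldl_cons, ih]
      simp only [pvStep, PySem.Dict.getD_modify]
      by_cases hv : m = x.2
      · simp [pvMaxKeys, hv]
      · have : ¬ (x.2 == m) = true := by simp [beq_iff_eq]; intro h; exact hv h.symm
        simp [pvMaxKeys, hv, this]

-- key membership in the grouping dict
lemma mem_keys_build (l : List (String × Int)) (g : PySem.Dict Int (List String)) (v : Int) :
    v ∈ (l.foldl pvStep g).keys ↔ v ∈ g.keys ∨ v ∈ l.map Prod.snd := by
  induction l generalizing g with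
  | nil => simp
  | cons x t ih =>
      rw [List.foldl_cons, ih]
      simp only [pvStep, PySem.Dict.keys_modify]
      rw [PySem.Dict.mem_keys_insert]
      simp only [List.map_cons, List.mem_cons]
      tauto

-- the two max computations pick the same value
lemma max_eq (dict1 : List (String × Int)) (a b : Int)
    (ha : PySem.List.max? (dict1.map Prod.snd) (fun v => v) = some a)
    (hb : PySem.List.max?
      ((dict1.foldl pvStep PySem.Dict.empty).keys) (fun v => v) = some b) :
    a = b := by
  have hma := PySem.List.max?_mem ha
  have hmb := PySem.List.max?_mem hb
  have hma' : a ∈ (dict1.foldl pvStep PySem.Dict.empty).keys := by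
    rw [mem_keys_build]; right; exact hma
  have hmb' : b ∈ dict1.map Prod.snd := by
    have := (mem_keys_build dict1 PySem.Dict.empty b).mp hmb
    simpa [PySem.Dict.keys_empty] using this
  have h1 := PySem.List.max?_isMax ha b hmb'
  have h2 := PySem.List.max?_isMax hb a hma'
  omega

-- ===== VERDICT (by name: the statement is the Claim_ definition above) =====
theorem sortedListOfDictMax_spec : Claim_equal_sortedListOfDictMax := by
  intro dict1 _ hpre
  obtain ⟨hne, hnodup⟩ := hpre
  unfold Spec_sortedListOfDictMax sortedListOfDictMax sortedListOfDictMax_alt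
  simp only []
  have hvals : (PySem.Dict.mk dict1).values = dict1.map Prod.snd := rfl
  -- the values list is nonempty, hence max? returns some
  have hvne : dict1.map Prod.snd ≠ [] := by
    intro h; exact hne (List.map_eq_nil_iff.mp h)
  obtain ⟨a, ha⟩ : ∃ a, PySem.List.max? (dict1.map Prod.snd) (fun v => v) = some a := by
    cases hcase : PySem.List.max? (dict1.map Prod.snd) (fun v => v) with
    | none => exact absurd ((PySem.List.max?_eq_none_iff _ _).mp hcase) hvne
    | some a => exact ⟨a, rfl⟩
  -- the grouping dict's keys are nonempty too
  have hkne : (dict1.foldl pvStep PySem.Dict.empty).keys ≠ [] := by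
    have hma := PySem.List.max?_mem ha
    have : a ∈ (dict1.foldl pvStep PySem.Dict.empty).keys := by
      rw [mem_keys_build]; right; exact hma
    intro h; rw [h] at this; exact absurd this (List.not_mem_nil)
  obtain ⟨b, hb⟩ : ∃ b, PySem.List.max?
      ((dict1.foldl pvStep PySem.Dict.empty).keys) (fun v => v) = some b := by
    cases hcase : PySem.List.max? ((dict1.foldl pvStep PySem.Dict.empty).keys) (fun v => v) with
    | none => exact absurd ((PySem.List.max?_eq_none_iff _ _).mp hcase) hkne
    | some b => exact ⟨b, rfl⟩
    -- (the fold in B's port is literally `fun g kv => g.modify kv.2 [] (fun l => l ++ [kv.1])` = pvStep)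
  have hstep : (fun g kv => PySem.Dict.modify g kv.2 [] (fun l => l ++ [kv.1])) = pvStep := rfl
  rw [hvals, ha, hstep, hb]
  simp only []
  rw [A_words_eq dict1 a hnodup, getD_build dict1 PySem.Dict.empty b,
      PySem.Dict.getD_empty, List.nil_append, max_eq dict1 a b ha hb]
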